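-- pv_equiv track=rewrite | github.com/rjmsun/efx-allocation-generation | efx.py | envy_graph_distance
-- ===== SOURCE A (Python) =====
-- def envy_graph_distance(allocation1, allocation2, valuations):
--     """
--     Calculate the edit distance between envy graphs of two allocations.
--     Returns the number of edge additions/deletions needed to transform one envy graph into another.
--     """
--     n = len(allocation1)
--
--     def build_envy_graph(allocation):
--         graph = set()
--         for i in range(n):
--             for j in range(n):
--                 if i != j:
--                     # Calculate utility of agent i for their own bundle
--                     u_own = sum(valuations[i][item] for item in allocation[i])
--                     # Calculate utility of agent i for agent j's bundle
--                     u_other = sum(valuations[i][item] for item in allocation[j])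
--                     if u_other > u_own:
--                         graph.add((i, j))
--         return graph
--
--     envy_graph1 = build_envy_graph(allocation1)
--     envy_graph2 = build_envy_graph(allocation2)
--
--     # Calculate edit distance
--     additions = len(envy_graph2 - envy_graph1)
--     deletions = len(envy_graph1 - envy_graph2)
--
--     return additions + deletions
-- ===== SOURCE B (Python) =====
-- def envy_graph_distance(allocation1, allocation2, valuations):
--     """Edit distance between the envy graphs of two allocations, computed in a
--     single disagreement-counting pass over ordered agent pairs (no edge sets)."""
--     n = len(allocation1)
--     dist = 0
--     for i in range(n):
--         for j in range(n):
--             if i == j: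
--                 continue
--             vi = valuations[i]
--             own1 = sum(vi[item] for item in allocation1[i])
--             oth1 = sum(vi[item] for item in allocation1[j])
--             own2 = sum(vi[item] for item in allocation2[i])
--             oth2 = sum(vi[item] for item in allocation2[j])
--             if (oth1 > own1) != (oth2 > own2):
--                 dist += 1
--     return dist
-- ===== Notes on version B (the rewrite author's own statement) =====
-- stated objective: alternative
-- what changed: B builds no envy-graph sets at all: it fuses the two graph constructions and the two set differences into one disagreement-counting pass over ordered pairs (i,j), keeping a single integer counter.
import Mathlib
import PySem

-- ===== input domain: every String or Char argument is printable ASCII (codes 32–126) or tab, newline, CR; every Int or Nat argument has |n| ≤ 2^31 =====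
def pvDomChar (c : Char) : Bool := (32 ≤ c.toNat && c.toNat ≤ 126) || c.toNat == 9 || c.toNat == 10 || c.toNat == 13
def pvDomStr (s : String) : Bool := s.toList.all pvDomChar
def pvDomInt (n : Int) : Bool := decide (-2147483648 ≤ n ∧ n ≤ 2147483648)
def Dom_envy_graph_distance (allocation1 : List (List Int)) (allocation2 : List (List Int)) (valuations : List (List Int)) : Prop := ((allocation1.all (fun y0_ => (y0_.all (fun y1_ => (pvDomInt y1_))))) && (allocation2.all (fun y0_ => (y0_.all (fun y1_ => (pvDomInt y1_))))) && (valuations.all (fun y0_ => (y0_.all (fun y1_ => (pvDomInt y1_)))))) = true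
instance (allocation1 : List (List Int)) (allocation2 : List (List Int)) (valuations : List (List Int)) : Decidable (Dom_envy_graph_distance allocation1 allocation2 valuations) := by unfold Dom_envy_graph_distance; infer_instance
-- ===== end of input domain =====

-- B replaces A's two envy-graph sets and their set differences by a single
-- disagreement-counting pass over ordered agent pairs (objective: alternative).

-- ===== PORT A =====
-- sum(valuations_i[item] for item in bundle)  (shared by both Pythons verbatim)
def pvSumVal (vi : List Int) (bundle : List Int) : Int :=
  bundle.foldl (fun acc item => acc + PySem.List.pyGetD vi item 0) 0

-- A's nested build_envy_graph(allocation) (closes over n and valuations)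
def pvBuildEnvyGraph (n : Int) (valuations : List (List Int)) (allocation : List (List Int)) : PySem.Set (Int × Int) :=
  (PySem.List.pyRange 0 n 1).foldl (fun g i =>
    (PySem.List.pyRange 0 n 1).foldl (fun g j =>
      if i ≠ j then
        let u_own := pvSumVal (PySem.List.pyGetD valuations i []) (PySem.List.pyGetD allocation i [])
        let u_other := pvSumVal (PySem.List.pyGetD valuations i []) (PySem.List.pyGetD allocation j [])
        if u_other > u_own then PySem.Set.add g (i, j) else g
      else g) g) PySem.Set.empty

def envy_graph_distance (allocation1 : List (List Int)) (allocation2 : List (List Int)) (valuations : List (List Int)) : Int :=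
  let n : Int := allocation1.length
  let envy_graph1 := pvBuildEnvyGraph n valuations allocation1
  let envy_graph2 := pvBuildEnvyGraph n valuations allocation2
  let additions := PySem.Set.len (PySem.Set.diff envy_graph2 envy_graph1)
  let deletions := PySem.Set.len (PySem.Set.diff envy_graph1 envy_graph2)
  additions + deletions

-- ===== PORT B =====
def envy_graph_distance_alt (allocation1 : List (List Int)) (allocation2 : List (List Int)) (valuations : List (List Int)) : Int :=
  let n : Int := allocation1.length
  (PySem.List.pyRange 0 n 1).foldl (fun dist i =>
    (PySem.List.pyRange 0 n 1).foldl (fun dist j =>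
      if i == j then dist
      else
        let vi := PySem.List.pyGetD valuations i []
        let own1 := pvSumVal vi (PySem.List.pyGetD allocation1 i [])
        let oth1 := pvSumVal vi (PySem.List.pyGetD allocation1 j [])
        let own2 := pvSumVal vi (PySem.List.pyGetD allocation2 i [])
        let oth2 := pvSumVal vi (PySem.List.pyGetD allocation2 j [])
        if (decide (oth1 > own1)) != (decide (oth2 > own2)) then dist + 1 else dist) dist) 0

-- ===== PRECONDITION & SPEC =====
-- Pre_ excludes exactly the inputs where A raises an IndexError: with at least two
-- agents, every agent index i < n must have a valuation row and a bundle in both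
-- allocations, and every item of every bundle of either allocation must be a valid
-- (possibly negative, Python-style) index into every row valuations[i], i < n,
-- since agent i sums its valuation of every bundle.  (With n ≤ 1 A indexes nothing.)
def Pre_envy_graph_distance (allocation1 : List (List Int)) (allocation2 : List (List Int)) (valuations : List (List Int)) : Prop :=
  2 ≤ allocation1.length →
    (allocation1.length ≤ allocation2.length ∧ allocation1.length ≤ valuations.length ∧
     ∀ i < allocation1.length, ∀ j < allocation1.length,
       ∀ item ∈ (allocation1.getD j [] ++ allocation2.getD j []),
         PySem.Raise.InRange (valuations.getD i []).length item)
instance (allocation1 : List (List Int)) (allocation2 : List (List Int)) (valuations : List (List Int)) : Decidable (Pre_envy_graph_distance allocation1 allocation2 valuations) := by unfold Pre_envy_graph_distance; infer_instance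

def pvWitness_envy_graph_distance : List (List Int) × List (List Int) × List (List Int) :=
  ([[0], [1]], [[1], [0]], [[1, 2], [3, 4]])

def Spec_envy_graph_distance (allocation1 : List (List Int)) (allocation2 : List (List Int)) (valuations : List (List Int)) (out : Int) : Prop := out = envy_graph_distance_alt allocation1 allocation2 valuations
instance (allocation1 : List (List Int)) (allocation2 : List (List Int)) (valuations : List (List Int)) (out : Int) : Decidable (Spec_envy_graph_distance allocation1 allocation2 valuations out) := by unfold Spec_envy_graph_distance; infer_instance

-- ===== CLAIM (what is proved, stated in full; the proofs are below) =====
def Claim_equal_envy_graph_distance : Prop := ∀ (allocation1 : List (List Int)) (allocation2 : List (List Int)) (valuations : List (List Int)), Dom_envy_graph_distance allocation1 allocation2 valuations → Pre_envy_graph_distance allocation1 allocation2 valuations → Spec_envy_graph_distance allocation1 allocation2 valuations (envy_graph_distance allocation1 allocation2 valuations)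

-- ===== LEMMAS AND PROOFS =====

-- the ordered-pair list both double loops traverse
def pvPairs (n : Int) : List (Int × Int) :=
  (PySem.List.pyRange 0 n 1) ×ˢ (PySem.List.pyRange 0 n 1)

theorem pvPairs_nodup (n : Int) : (pvPairs n).Nodup :=
  List.Nodup.product (PySem.List.nodup_pyRange_one 0 n) (PySem.List.nodup_pyRange_one 0 n)

-- conditionally adding the members of a Nodup list to a set none of them is in
-- appends exactly the filtered list
theorem pvFoldl_add_filter {α : Type} [BEq α] [LawfulBEq α] (p : α → Bool) :
    ∀ (l : List α) (s : List α), l.Nodup → (∀ x ∈ l, x ∉ s) →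
      l.foldl (fun g x => if p x then PySem.Set.add g x else g) s = s ++ l.filter p := by
  intro l
  induction l with
  | nil => intro s _ _; simp
  | cons x t ih =>
    intro s hnd hnotin
    have hx : x ∉ s := hnotin x (by simp)
    have hnd' : t.Nodup := (List.nodup_cons.mp hnd).2
    have hxt : x ∉ t := (List.nodup_cons.mp hnd).1
    simp only [List.foldl_cons, List.filter_cons]
    by_cases hp : p x
    · rw [if_pos hp, if_pos hp, PySem.Set.add_of_not_mem hx,
        ih (s ++ [x]) hnd' (by
          intro y hy
          simp only [List.mem_append, List.mem_singleton, not_or]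
          exact ⟨hnotin y (List.mem_cons_of_mem _ hy), fun h => hxt (h ▸ hy)⟩)]
      simp
    · rw [if_neg hp, if_neg (by simpa using hp),
        ih s hnd' (fun y hy => hnotin y (List.mem_cons_of_mem _ hy))]

-- length of the Set-difference of two filters of the same Nodup list
theorem pvLen_diff_filter {α : Type} [BEq α] [LawfulBEq α] (l : List α) (p q : α → Bool) :
    PySem.Set.len (PySem.Set.diff (l.filter p) (l.filter q))
      = (l.countP (fun x => p x && !q x) : Int) := by
  unfold PySem.Set.len PySem.Set.diff
  rw [List.filter_filter]
  congr 1
  rw [← List.countP_eq_length_filter]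
  apply List.countP_congr
  intro a ha
  have hmem : PySem.Set.contains (List.filter q l) a = true ↔ q a = true := by
    rw [PySem.Set.contains_iff]
    simp [List.mem_filter, ha]
  cases hc : PySem.Set.contains (List.filter q l) a <;> cases hq : q a <;>
    cases hp : p a <;> simp_all

-- split a disagreement count into the two one-sided counts
theorem pvCountP_xor {α : Type} (l : List α) (p q : α → Bool) :
    l.countP (fun x => p x && !q x) + l.countP (fun x => q x && !p x)
      = l.countP (fun x => p x != q x) := by
  induction l with
  | nil => simp
  | cons x t ih =>
    simp only [List.countP_cons]
    cases hp : p x <;> cases hq : q x <;> simp <;> omega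

-- A's envy test for a pair, under allocation `alloc`
def pvEnvy (valuations alloc : List (List Int)) (x : Int × Int) : Bool :=
  decide (pvSumVal (PySem.List.pyGetD valuations x.1 []) (PySem.List.pyGetD alloc x.1 [])
    < pvSumVal (PySem.List.pyGetD valuations x.1 []) (PySem.List.pyGetD alloc x.2 []))

def pvCond (valuations alloc : List (List Int)) (x : Int × Int) : Bool :=
  decide (x.1 ≠ x.2) && pvEnvy valuations alloc x

theorem pvBuild_foldl (n : Int) (v alloc : List (List Int)) :
    pvBuildEnvyGraph n v alloc
      = (pvPairs n).foldl (fun g x =>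
          if x.1 ≠ x.2 then
            (if pvSumVal (PySem.List.pyGetD v x.1 []) (PySem.List.pyGetD alloc x.1 [])
                < pvSumVal (PySem.List.pyGetD v x.1 []) (PySem.List.pyGetD alloc x.2 [])
             then PySem.Set.add g x else g)
          else g) PySem.Set.empty := by
  unfold pvBuildEnvyGraph pvPairs
  simp only [SProd.sprod, List.product, List.foldl_flatMap, List.foldl_map]

theorem pvBuild_eq_filter (n : Int) (v alloc : List (List Int)) :
    pvBuildEnvyGraph n v alloc = (pvPairs n).filter (pvCond v alloc) := by
  rw [pvBuild_foldl]
  have h := PySem.List.foldl_congr_mem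
    (l := pvPairs n) (init := (PySem.Set.empty : PySem.Set (Int × Int)))
    (f := fun g x =>
          if x.1 ≠ x.2 then
            (if pvSumVal (PySem.List.pyGetD v x.1 []) (PySem.List.pyGetD alloc x.1 [])
                < pvSumVal (PySem.List.pyGetD v x.1 []) (PySem.List.pyGetD alloc x.2 [])
             then PySem.Set.add g x else g)
          else g)
    (g := fun g x => if pvCond v alloc x then PySem.Set.add g x else g)
    (by
      intro acc x _
      simp only [pvCond, pvEnvy]
      by_cases h1 : x.1 ≠ x.2
      · simp [h1]
      · simp [h1])
  rw [h]
  simpa using pvFoldl_add_filter (pvCond v alloc) (pvPairs n) PySem.Set.empty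
    (pvPairs_nodup n) (by simp [PySem.Set.empty])

theorem pvAlt_foldl (allocation1 allocation2 valuations : List (List Int)) :
    envy_graph_distance_alt allocation1 allocation2 valuations
      = (pvPairs (allocation1.length)).foldl (fun dist x =>
          if x.1 == x.2 then dist
          else if (pvEnvy valuations allocation1 x != pvEnvy valuations allocation2 x)
               then dist + 1 else dist) 0 := by
  unfold envy_graph_distance_alt pvPairs pvEnvy
  simp only [SProd.sprod, List.product, List.foldl_flatMap, List.foldl_map]

theorem envy_graph_distance_spec' (allocation1 allocation2 valuations : List (List Int)) :
    envy_graph_distance allocation1 allocation2 valuations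
      = envy_graph_distance_alt allocation1 allocation2 valuations := by
  simp only [envy_graph_distance]
  rw [pvAlt_foldl, pvBuild_eq_filter, pvBuild_eq_filter]
  set c1 := pvCond valuations allocation1
  set c2 := pvCond valuations allocation2
  rw [pvLen_diff_filter, pvLen_diff_filter]
  have hB : (pvPairs (allocation1.length)).foldl (fun dist x =>
          if x.1 == x.2 then dist
          else if (pvEnvy valuations allocation1 x != pvEnvy valuations allocation2 x)
               then dist + 1 else dist) 0
      = ((pvPairs (allocation1.length)).countP
          (fun x => !(x.1 == x.2) && (pvEnvy valuations allocation1 x != pvEnvy valuations allocation2 x)) : Int) := by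
    rw [PySem.List.foldl_congr_mem
      (l := pvPairs (allocation1.length)) (init := (0 : Int))
      (f := fun dist x =>
          if x.1 == x.2 then dist
          else if (pvEnvy valuations allocation1 x != pvEnvy valuations allocation2 x)
               then dist + 1 else dist)
      (g := fun dist x =>
        if (!(x.1 == x.2) && (pvEnvy valuations allocation1 x != pvEnvy valuations allocation2 x))
        then dist + 1 else dist)
      (by intro acc x _
          cases h1 : (x.1 == x.2) <;>
            cases h2 : (pvEnvy valuations allocation1 x != pvEnvy valuations allocation2 x) <;>
            simp [h1, h2])]
    rw [PySem.List.foldl_if_add_one]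
    simp
  rw [hB]
  rw [show ((pvPairs (allocation1.length)).countP (fun x => c2 x && !c1 x) : Int)
        + ((pvPairs (allocation1.length)).countP (fun x => c1 x && !c2 x) : Int)
      = (((pvPairs (allocation1.length)).countP (fun x => c2 x && !c1 x)
        + (pvPairs (allocation1.length)).countP (fun x => c1 x && !c2 x) : Nat) : Int) by push_cast; ring]
  rw [pvCountP_xor]
  congr 1
  apply List.countP_congr
  intro x _
  simp only [c1, c2, pvCond]
  cases ha : decide (x.1 ≠ x.2) <;>
    cases h1 : pvEnvy valuations allocation1 x <;>
    cases h2 : pvEnvy valuations allocation2 x <;>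
    simp_all

-- ===== VERDICT (by name: the statement is the Claim_ definition above) =====
theorem envy_graph_distance_spec : Claim_equal_envy_graph_distance := by
  intro a1 a2 v _ _
  unfold Spec_envy_graph_distance
  exact envy_graph_distance_spec' a1 a2 v
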